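-- pv_equiv track=rewrite | github.com/fedutinova/fsa | analyzer/file_permissions.py | categorize_permissions
-- ===== SOURCE A (Python) =====
-- import stat
--
-- def categorize_permissions(file_info):
--     permissions_categories = {
--         'world_writable': [],
--         'suid_files': [],
--         'sgid_files': [],
--         'sticky_files': [],
--     }
--
--     for file_path, _, mode in file_info:
--         if mode & stat.S_IWOTH:
--             permissions_categories['world_writable'].append(file_path)
--         if mode & stat.S_ISUID:
--             permissions_categories['suid_files'].append(file_path)
--         if mode & stat.S_ISGID:
--             permissions_categories['sgid_files'].append(file_path)
--         if mode & stat.S_ISVTX: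
--             permissions_categories['sticky_files'].append(file_path)
--
--     return permissions_categories
-- ===== SOURCE B (Python) =====
-- S_IWOTH = 0o0002
-- S_ISUID = 0o4000
-- S_ISGID = 0o2000
-- S_ISVTX = 0o1000
--
-- def categorize_permissions(file_info):
--     records = list(file_info)
--
--     def solve(lo, hi):
--         # divide and conquer: per-category lists of a concatenation are the
--         # concatenations of the per-category lists of the halves
--         if hi - lo == 0:
--             return [], [], [], []
--         if hi - lo == 1:
--             file_path, _, mode = records[lo]
--             return ([file_path] if mode & S_IWOTH else [],
--                     [file_path] if mode & S_ISUID else [],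
--                     [file_path] if mode & S_ISGID else [],
--                     [file_path] if mode & S_ISVTX else [])
--         mid = (lo + hi) // 2
--         lw, ls, lg, lt = solve(lo, mid)
--         rw, rs, rg, rt = solve(mid, hi)
--         return lw + rw, ls + rs, lg + rg, lt + rt
--
--     ww, su, sg, st_ = solve(0, len(records))
--     return {
--         'world_writable': ww,
--         'suid_files': su,
--         'sgid_files': sg,
--         'sticky_files': st_,
--     }
-- ===== Notes on version B (the rewrite author's own statement) =====
-- stated objective: alternative
-- what changed: Replaces the single accumulating pass by a divide-and-conquer recursion: split the record list in half, categorize each half, and merge by concatenating the four per-category lists.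
import Mathlib
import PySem

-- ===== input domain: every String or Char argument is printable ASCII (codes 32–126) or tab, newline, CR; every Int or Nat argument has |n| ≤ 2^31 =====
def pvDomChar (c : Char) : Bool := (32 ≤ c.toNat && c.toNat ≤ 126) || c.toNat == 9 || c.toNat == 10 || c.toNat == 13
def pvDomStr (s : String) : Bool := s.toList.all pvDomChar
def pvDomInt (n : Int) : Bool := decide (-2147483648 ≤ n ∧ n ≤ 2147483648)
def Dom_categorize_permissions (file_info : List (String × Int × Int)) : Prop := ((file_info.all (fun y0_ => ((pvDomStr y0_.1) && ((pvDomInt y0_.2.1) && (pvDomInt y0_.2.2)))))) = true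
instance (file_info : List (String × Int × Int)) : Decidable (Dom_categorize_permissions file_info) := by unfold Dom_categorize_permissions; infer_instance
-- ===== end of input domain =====

-- B: divide-and-conquer — split the record list in half, categorize each half recursively, merge by concatenating the four per-category lists (alternative decomposition, not faster).


-- ===== PORT A =====
-- single pass, four conditional appends into the four category lists
def categorize_permissions (file_info : List (String × Int × Int)) : List (String × List String) :=
  let r := file_info.foldl (fun acc rec =>
    let fp := rec.1; let mode := rec.2.2
    ( (if PySem.Int.band mode 2 ≠ 0 then acc.1 ++ [fp] else acc.1),
      (if PySem.Int.band mode 2048 ≠ 0 then acc.2.1 ++ [fp] else acc.2.1),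
      (if PySem.Int.band mode 1024 ≠ 0 then acc.2.2.1 ++ [fp] else acc.2.2.1),
      (if PySem.Int.band mode 512 ≠ 0 then acc.2.2.2 ++ [fp] else acc.2.2.2) ))
    ([], [], [], [])
  [("world_writable", r.1), ("suid_files", r.2.1), ("sgid_files", r.2.2.1), ("sticky_files", r.2.2.2)]

-- ===== PORT B =====
-- recursive divide-and-conquer over the record list; the half split records[lo:mid] / records[mid:hi]
-- of Source B is the take/drop split at len/2 (Python's (lo+hi)//2 - lo = (hi-lo)//2)
def pvSolve : List (String × Int × Int) → List String × List String × List String × List String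
  | [] => ([], [], [], [])
  | [r] =>
      ( (if PySem.Int.band r.2.2 2 ≠ 0 then [r.1] else []),
        (if PySem.Int.band r.2.2 2048 ≠ 0 then [r.1] else []),
        (if PySem.Int.band r.2.2 1024 ≠ 0 then [r.1] else []),
        (if PySem.Int.band r.2.2 512 ≠ 0 then [r.1] else []) )
  | x :: y :: rest =>
      let l := x :: y :: rest
      let mid := l.length / 2
      let L := pvSolve (l.take mid)
      let R := pvSolve (l.drop mid)
      (L.1 ++ R.1, L.2.1 ++ R.2.1, L.2.2.1 ++ R.2.2.1, L.2.2.2 ++ R.2.2.2)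
  termination_by l => l.length
  decreasing_by
    · simp [List.length_take]; omega
    · simp [List.length_drop]; omega

def categorize_permissions_alt (file_info : List (String × Int × Int)) : List (String × List String) :=
  let r := pvSolve file_info
  [("world_writable", r.1), ("suid_files", r.2.1), ("sgid_files", r.2.2.1), ("sticky_files", r.2.2.2)]

-- ===== PRECONDITION & SPEC =====
def Spec_categorize_permissions (file_info : List (String × Int × Int)) (out : List (String × List String)) : Prop := out = categorize_permissions_alt file_info
instance (file_info : List (String × Int × Int)) (out : List (String × List String)) : Decidable (Spec_categorize_permissions file_info out) := by unfold Spec_categorize_permissions; infer_instance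

-- ===== CLAIM (what is proved, stated in full; the proofs are below) =====
def Claim_equal_categorize_permissions : Prop := ∀ (file_info : List (String × Int × Int)), Dom_categorize_permissions file_info → Spec_categorize_permissions file_info (categorize_permissions file_info)

-- ===== LEMMAS AND PROOFS =====

-- canonical form: the list of file paths whose mode has the given bit set
def pvF (bit : Int) (l : List (String × Int × Int)) : List String :=
  (l.filter (fun r => PySem.Int.band r.2.2 bit ≠ 0)).map Prod.fst

lemma pvF_append (bit : Int) (a b : List (String × Int × Int)) :
    pvF bit (a ++ b) = pvF bit a ++ pvF bit b := by
  simp [pvF]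

lemma pvF_single (bit : Int) (r : String × Int × Int) :
    pvF bit [r] = if PySem.Int.band r.2.2 bit ≠ 0 then [r.1] else [] := by
  by_cases h : PySem.Int.band r.2.2 bit = 0 <;> simp [pvF, h]

lemma pvSolve_eq (l : List (String × Int × Int)) :
    pvSolve l = (pvF 2 l, pvF 2048 l, pvF 1024 l, pvF 512 l) := by
  induction hn : l.length using Nat.strong_induction_on generalizing l with
  | _ n ih =>
  match l with
  | [] => simp [pvSolve, pvF]
  | [r] => rw [pvSolve, pvF_single, pvF_single, pvF_single, pvF_single]
  | x :: y :: rest =>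
    rw [pvSolve]
    have hlen : (x :: y :: rest).length = n := hn
    have h1 : ((x :: y :: rest).take ((x :: y :: rest).length / 2)).length < n := by
      simp [List.length_take]; simp at hlen; omega
    have h2 : ((x :: y :: rest).drop ((x :: y :: rest).length / 2)).length < n := by
      simp [List.length_drop]; simp at hlen; omega
    rw [ih _ h1 _ rfl, ih _ h2 _ rfl]
    simp only []
    rw [← pvF_append, ← pvF_append, ← pvF_append, ← pvF_append, List.take_append_drop]

lemma pvA_loop (bit : Int) (l : List (String × Int × Int)) (acc : List String) :
    l.foldl (fun acc rec => if PySem.Int.band rec.2.2 bit ≠ 0 then acc ++ [rec.1] else acc) acc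
      = acc ++ pvF bit l := by
  induction l generalizing acc with
  | nil => simp [pvF]
  | cons h t ih =>
    rw [List.foldl_cons, ih]
    by_cases hb : PySem.Int.band h.2.2 bit = 0 <;> simp [pvF, hb]

-- ===== VERDICT (by name: the statement is the Claim_ definition above) =====
theorem categorize_permissions_spec : Claim_equal_categorize_permissions := by
  intro file_info _
  unfold Spec_categorize_permissions categorize_permissions categorize_permissions_alt
  rw [pvSolve_eq]
  simp only []
  rw [PySem.List.foldl_prod_mk (f := fun acc (rec : String × Int × Int) => if PySem.Int.band rec.2.2 2 ≠ 0 then acc ++ [rec.1] else acc)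
        (g := fun acc (rec : String × Int × Int) =>
          ( (if PySem.Int.band rec.2.2 2048 ≠ 0 then acc.1 ++ [rec.1] else acc.1),
            (if PySem.Int.band rec.2.2 1024 ≠ 0 then acc.2.1 ++ [rec.1] else acc.2.1),
            (if PySem.Int.band rec.2.2 512 ≠ 0 then acc.2.2 ++ [rec.1] else acc.2.2) ))]
  rw [PySem.List.foldl_prod_mk (f := fun acc (rec : String × Int × Int) => if PySem.Int.band rec.2.2 2048 ≠ 0 then acc ++ [rec.1] else acc)
        (g := fun acc (rec : String × Int × Int) =>
          ( (if PySem.Int.band rec.2.2 1024 ≠ 0 then acc.1 ++ [rec.1] else acc.1),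
            (if PySem.Int.band rec.2.2 512 ≠ 0 then acc.2 ++ [rec.1] else acc.2) ))]
  rw [PySem.List.foldl_prod_mk (f := fun acc (rec : String × Int × Int) => if PySem.Int.band rec.2.2 1024 ≠ 0 then acc ++ [rec.1] else acc)
        (g := fun acc (rec : String × Int × Int) => if PySem.Int.band rec.2.2 512 ≠ 0 then acc ++ [rec.1] else acc)]
  rw [pvA_loop 2, pvA_loop 2048, pvA_loop 1024, pvA_loop 512]
  simp
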